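-- pv_equiv track=rewrite | github.com/SherRao/Code-and-Chill-5.0 | beginner/ReturnDivisibleNums.py | returnDivisibleNums
-- ===== SOURCE A (Python) =====
-- def returnDivisibleNums(n):
--     res = []
--     for i in range(n):
--         if i % 3 == 0 and i % 5 != 0:
--             res.append(i)
--         elif i % 5 == 0 and i % 3 != 0:
--             res.append(i)
--     return res
-- ===== SOURCE B (Python) =====
-- def returnDivisibleNums(n):
--     # multiples of 3 below n that are not multiples of 15, ascending
--     a = [i for i in range(0, n, 3) if i % 15 != 0]
--     # multiples of 5 below n that are not multiples of 15, ascending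
--     b = [i for i in range(0, n, 5) if i % 15 != 0]
--     res = []
--     i = j = 0
--     while i < len(a) and j < len(b):
--         if a[i] < b[j]:
--             res.append(a[i]); i += 1
--         else:
--             res.append(b[j]); j += 1
--     res.extend(a[i:])
--     res.extend(b[j:])
--     return res
-- ===== Notes on version B (the rewrite author's own statement) =====
-- stated objective: alternative
-- what changed: Instead of testing every i in range(n) against both moduli, B generates the multiples of 3 and of 5 below n directly with stepped ranges (dropping multiples of 15) and combines the two ascending lists with a two-pointer merge.
import Mathlib
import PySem

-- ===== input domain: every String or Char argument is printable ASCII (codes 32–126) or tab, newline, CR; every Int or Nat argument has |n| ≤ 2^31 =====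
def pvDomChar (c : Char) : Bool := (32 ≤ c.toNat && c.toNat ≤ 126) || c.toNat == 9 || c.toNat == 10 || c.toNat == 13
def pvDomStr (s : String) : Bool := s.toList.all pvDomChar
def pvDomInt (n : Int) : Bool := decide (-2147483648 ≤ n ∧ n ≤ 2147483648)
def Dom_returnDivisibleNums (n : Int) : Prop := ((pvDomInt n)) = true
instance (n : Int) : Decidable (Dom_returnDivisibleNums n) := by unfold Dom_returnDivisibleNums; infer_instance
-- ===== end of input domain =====

-- B generates the multiples of 3 (resp. 5) below n that are not multiples of 15 via stepped
-- ranges and combines the two ascending lists with a two-pointer merge, instead of testing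
-- every i < n against both moduli; objective: alternative algorithm (same return value).

-- ===== PORT A =====
def returnDivisibleNums (n : Int) : List Int :=
  (PySem.List.pyRange 0 n 1).foldl
    (fun res i =>
      if PySem.Int.mod i 3 = 0 ∧ PySem.Int.mod i 5 ≠ 0 then res ++ [i]
      else if PySem.Int.mod i 5 = 0 ∧ PySem.Int.mod i 3 ≠ 0 then res ++ [i]
      else res) []

-- ===== PORT B =====
-- two-pointer ascending merge (the while loop + the two extends of Source B)
def mergeAsc : List Int → List Int → List Int
  | [], ys => ys
  | x :: xs, [] => x :: xs
  | x :: xs, y :: ys =>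
      if x < y then x :: mergeAsc xs (y :: ys)
      else y :: mergeAsc (x :: xs) ys
  termination_by xs ys => xs.length + ys.length
  decreasing_by all_goals simp

def returnDivisibleNums_alt (n : Int) : List Int :=
  let a := (PySem.List.pyRange 0 n 3).filter (fun i => decide (PySem.Int.mod i 15 ≠ 0))
  let b := (PySem.List.pyRange 0 n 5).filter (fun i => decide (PySem.Int.mod i 15 ≠ 0))
  mergeAsc a b

-- ===== PRECONDITION & SPEC =====
def Spec_returnDivisibleNums (n : Int) (out : List Int) : Prop := out = returnDivisibleNums_alt n
instance (n : Int) (out : List Int) : Decidable (Spec_returnDivisibleNums n out) := by unfold Spec_returnDivisibleNums; infer_instance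

-- ===== CLAIM (what is proved, stated in full; the proofs are below) =====
def Claim_equal_returnDivisibleNums : Prop := ∀ (n : Int), Dom_returnDivisibleNums n → Spec_returnDivisibleNums n (returnDivisibleNums n)

-- ===== LEMMAS AND PROOFS =====

-- A's foldl is the filter of range n by "divisible by exactly one of 3, 5"
theorem portA_eq_filter (n : Int) :
    returnDivisibleNums n =
      (PySem.List.pyRange 0 n 1).filter
        (fun i => decide ((PySem.Int.mod i 3 = 0 ∧ PySem.Int.mod i 5 ≠ 0) ∨
                          (PySem.Int.mod i 5 = 0 ∧ PySem.Int.mod i 3 ≠ 0))) := by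
  unfold returnDivisibleNums
  have hfun : (fun (res : List Int) (i : Int) =>
      if PySem.Int.mod i 3 = 0 ∧ PySem.Int.mod i 5 ≠ 0 then res ++ [i]
      else if PySem.Int.mod i 5 = 0 ∧ PySem.Int.mod i 3 ≠ 0 then res ++ [i]
      else res)
      = (fun (res : List Int) (i : Int) =>
      if (PySem.Int.mod i 3 = 0 ∧ PySem.Int.mod i 5 ≠ 0) ∨
         (PySem.Int.mod i 5 = 0 ∧ PySem.Int.mod i 3 ≠ 0) then res ++ [i] else res) := by
    funext res i
    split_ifs with h1 h2 h3 h4 h5 <;> tauto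
  rw [hfun, PySem.List.foldl_append_ite_eq_filter]
  simp

theorem merge_perm (xs ys : List Int) : (mergeAsc xs ys).Perm (xs ++ ys) := by
  fun_induction mergeAsc xs ys with
  | case1 ys => simp
  | case2 x xs => simp
  | case3 x xs y ys h ih => simpa using ih.cons x
  | case4 x xs y ys h ih =>
      exact (ih.cons y).trans (List.perm_middle (a := y) (l₁ := x :: xs) (l₂ := ys)).symm

theorem mem_merge (z : Int) (xs ys : List Int) : z ∈ mergeAsc xs ys ↔ z ∈ xs ∨ z ∈ ys := by
  rw [(merge_perm xs ys).mem_iff]; simp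

theorem merge_pairwise (xs ys : List Int)
    (hx : xs.Pairwise (· < ·)) (hy : ys.Pairwise (· < ·))
    (hne : ∀ x ∈ xs, ∀ y ∈ ys, x ≠ y) :
    (mergeAsc xs ys).Pairwise (· < ·) := by
  fun_induction mergeAsc xs ys with
  | case1 ys => exact hy
  | case2 x xs => exact hx
  | case3 x xs y ys h ih =>
      rw [List.pairwise_cons] at hx
      refine List.pairwise_cons.mpr ⟨?_, ih hx.2 hy (fun a ha => hne a (List.mem_cons_of_mem x ha))⟩
      intro z hz
      rcases (mem_merge z xs (y :: ys)).1 hz with h1 | h1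
      · exact hx.1 z h1
      · rcases List.mem_cons.1 h1 with rfl | h2
        · exact h
        · exact lt_trans h ((List.pairwise_cons.1 hy).1 z h2)
  | case4 x xs y ys h ih =>
      rw [List.pairwise_cons] at hy
      have hyx : y < x := lt_of_le_of_ne (not_lt.1 h) (fun e => hne x List.mem_cons_self y List.mem_cons_self e.symm)
      refine List.pairwise_cons.mpr ⟨?_, ih hx hy.2 (fun a ha b hb => hne a ha b (List.mem_cons_of_mem y hb))⟩
      intro z hz
      rcases (mem_merge z (x :: xs) ys).1 hz with h1 | h1
      · rcases List.mem_cons.1 h1 with rfl | h2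
        · exact hyx
        · exact lt_trans hyx ((List.pairwise_cons.1 hx).1 z h2)
      · exact hy.1 z h1

theorem pairwise_pyRange_pos (a b s : Int) (hs : 0 < s) :
    (PySem.List.pyRange a b s).Pairwise (· < ·) := by
  rw [PySem.List.pyRange_of_pos a b hs]
  refine List.Pairwise.map _ ?_ (List.pairwise_lt_range)
  intro i j hij
  have : (i : Int) < (j : Int) := by exact_mod_cast hij
  nlinarith

theorem mem_sideList (n s z : Int) (hs : 0 < s) :
    z ∈ (PySem.List.pyRange 0 n s).filter (fun i => decide (PySem.Int.mod i 15 ≠ 0)) ↔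
      (0 ≤ z ∧ z < n ∧ s ∣ z ∧ ¬ (15 ∣ z)) := by
  simp [List.mem_filter, PySem.List.mem_pyRange_iff_of_pos hs, PySem.Int.mod, Int.fmod_eq_emod]
  omega

theorem returnDivisibleNums_eq (n : Int) : returnDivisibleNums n = returnDivisibleNums_alt n := by
  rw [portA_eq_filter]
  unfold returnDivisibleNums_alt
  set a := (PySem.List.pyRange 0 n 3).filter (fun i => decide (PySem.Int.mod i 15 ≠ 0)) with ha
  set b := (PySem.List.pyRange 0 n 5).filter (fun i => decide (PySem.Int.mod i 15 ≠ 0)) with hb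
  have hma : ∀ z, z ∈ a ↔ (0 ≤ z ∧ z < n ∧ 3 ∣ z ∧ ¬ (15 ∣ z)) := fun z => mem_sideList n 3 z (by norm_num)
  have hmb : ∀ z, z ∈ b ↔ (0 ≤ z ∧ z < n ∧ 5 ∣ z ∧ ¬ (15 ∣ z)) := fun z => mem_sideList n 5 z (by norm_num)
  have hpa : a.Pairwise (· < ·) := (pairwise_pyRange_pos 0 n 3 (by norm_num)).filter _
  have hpb : b.Pairwise (· < ·) := (pairwise_pyRange_pos 0 n 5 (by norm_num)).filter _
  have hne : ∀ x ∈ a, ∀ y ∈ b, x ≠ y := by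
    intro x hx y hy e
    have h1 := (hma x).1 hx
    have h2 := (hmb y).1 hy
    subst e
    omega
  -- left side: strictly sorted filter of range n
  have hpl : ((PySem.List.pyRange 0 n 1).filter
      (fun i => decide ((PySem.Int.mod i 3 = 0 ∧ PySem.Int.mod i 5 ≠ 0) ∨
                        (PySem.Int.mod i 5 = 0 ∧ PySem.Int.mod i 3 ≠ 0)))).Pairwise (· < ·) :=
    (PySem.List.pairwise_lt_pyRange_one 0 n).filter _
  have hpm : (mergeAsc a b).Pairwise (· < ·) := merge_pairwise a b hpa hpb hne
  -- same membership
  have hmem : ∀ z, z ∈ (PySem.List.pyRange 0 n 1).filter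
      (fun i => decide ((PySem.Int.mod i 3 = 0 ∧ PySem.Int.mod i 5 ≠ 0) ∨
                        (PySem.Int.mod i 5 = 0 ∧ PySem.Int.mod i 3 ≠ 0))) ↔ z ∈ mergeAsc a b := by
    intro z
    rw [mem_merge, hma, hmb]
    simp [List.mem_filter, PySem.List.mem_pyRange_one, PySem.Int.mod, Int.fmod_eq_emod]
    omega
  have hperm : ((PySem.List.pyRange 0 n 1).filter
      (fun i => decide ((PySem.Int.mod i 3 = 0 ∧ PySem.Int.mod i 5 ≠ 0) ∨
                        (PySem.Int.mod i 5 = 0 ∧ PySem.Int.mod i 3 ≠ 0)))).Perm (mergeAsc a b) :=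
    (List.perm_ext_iff_of_nodup
      (hpl.imp (fun h => ne_of_lt h)) (hpm.imp (fun h => ne_of_lt h))).2 hmem
  exact hperm.eq_of_pairwise (le := (· < ·))
    (fun a b _ _ h1 h2 => absurd h2 (lt_asymm h1)) hpl hpm

-- ===== VERDICT (by name: the statement is the Claim_ definition above) =====
theorem returnDivisibleNums_spec : Claim_equal_returnDivisibleNums := by
  intro n _
  unfold Spec_returnDivisibleNums
  exact returnDivisibleNums_eq n
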